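-- pv_equiv track=rewrite | github.com/chriskay25/python-kata | best_travel.py | best_travel
-- ===== SOURCE A (Python) =====
-- import itertools
--
-- def best_travel(t, k, ls):
--     diffs, sums = [], []
--     combos = set(itertools.combinations(ls, k))
--     for c in combos:
--         if sum(c) <= t:
--             sums.append(sum(c))
--             diffs.append(t - sum(c))
--     closest = min(diffs)
--     idx = diffs.index(closest)
--     return sums[idx]
-- ===== SOURCE B (Python) =====
-- def achievable(k, ls):
--     # dp[j] = set of sums achievable by choosing exactly j elements
--     dp = [set() for _ in range(k + 1)]
--     dp[0].add(0)
--     for x in ls: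
--         dp = dp[:1] + [cur | {s + x for s in prev} for cur, prev in zip(dp[1:], dp)]
--     return dp
--
-- def best_travel(t, k, ls):
--     # DP over (count chosen, achievable sum), run on the smaller of "pick k" / "drop len-k".
--     total = sum(ls)
--     if 2 * k <= len(ls):
--         dp = achievable(k, ls)
--         return max(s for s in dp[k] if s <= t)
--     else:
--         r = len(ls) - k
--         dp = achievable(r, ls)
--         return total - min(d for d in dp[r] if d >= total - t)
-- ===== Notes on version B (the rewrite author's own statement) =====
-- stated objective: alternative
-- what changed: Replaced enumeration of all C(n,k) combinations (collecting sums and diffs, then min-diff lookup) by a 0/1-knapsack style DP over (number of elements chosen, set of achievable sums), run on the smaller of 'pick k elements' / 'drop len(ls)-k elements'; the DP collapses duplicate partial sums, but with arbitrary 32-bit values its state space can still grow like A's, so no speed is claimed.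
import Mathlib
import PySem

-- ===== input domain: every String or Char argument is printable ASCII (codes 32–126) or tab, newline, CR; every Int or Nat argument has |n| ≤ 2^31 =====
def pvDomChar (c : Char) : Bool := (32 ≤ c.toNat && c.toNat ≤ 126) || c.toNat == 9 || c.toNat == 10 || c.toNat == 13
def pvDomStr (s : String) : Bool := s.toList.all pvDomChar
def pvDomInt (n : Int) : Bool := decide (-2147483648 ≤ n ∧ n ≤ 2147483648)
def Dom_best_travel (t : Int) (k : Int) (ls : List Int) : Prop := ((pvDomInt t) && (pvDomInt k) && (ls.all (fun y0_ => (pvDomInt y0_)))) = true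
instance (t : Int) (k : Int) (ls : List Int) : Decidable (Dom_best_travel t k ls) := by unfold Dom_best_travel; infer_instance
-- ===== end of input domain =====

-- B replaces A's enumeration of all C(n,k) combinations by a knapsack-style DP over (count chosen, set of achievable sums), run on the smaller of "pick k" / "drop len(ls)-k"; objective: alternative algorithm.

-- ===== PORT A =====
def best_travel (t : Int) (k : Int) (ls : List Int) : Int :=
  let combos : PySem.Set (List Int) := PySem.Set.ofList (PySem.List.combinations ls k.toNat)
  let sd : List Int × List Int :=
    combos.foldl (fun (p : List Int × List Int) c =>
      if c.sum ≤ t then (p.1 ++ [c.sum], p.2 ++ [t - c.sum]) else p) ([], [])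
  match PySem.List.min? sd.2 (fun d => d) with
  | none => 0   -- min([]) raises ValueError: excluded by Pre_
  | some closest =>
    match PySem.List.index? sd.2 closest with
    | none => 0
    | some idx => (PySem.List.pyGet? sd.1 (idx : Int)).getD 0

-- ===== PORT B =====
-- one loop step of B: dp[:1] + [cur | {s + x for s in prev} for cur, prev in zip(dp[1:], dp)]
def bt_step (x : Int) (dp : List (PySem.Set Int)) : List (PySem.Set Int) :=
  dp.take 1 ++ ((dp.drop 1).zip dp).map
    (fun cp => PySem.Set.union cp.1 (PySem.Set.ofList (cp.2.map (· + x))))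

-- achievable(k, ls): dp[j] = set of sums achievable by choosing exactly j elements
def bt_achievable (k : Int) (ls : List Int) : List (PySem.Set Int) :=
  let dp0 : List (PySem.Set Int) :=
    (List.replicate (k + 1).toNat (PySem.Set.empty)).modify 0 (fun s => PySem.Set.add s 0)
  ls.foldl (fun dp x => bt_step x dp) dp0

def best_travel_alt (t : Int) (k : Int) (ls : List Int) : Int :=
  let total := ls.sum
  if 2 * k ≤ (ls.length : Int) then
    let dp := bt_achievable k ls
    match PySem.List.max? ((dp.getD k.toNat PySem.Set.empty).filter (fun s => decide (s ≤ t))) (fun s => s) with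
    | some m => m
    | none => 0   -- max() of an empty generator raises ValueError: excluded by Pre_
  else
    let r : Int := (ls.length : Int) - k
    let dp := bt_achievable r ls
    match PySem.List.min? ((dp.getD r.toNat PySem.Set.empty).filter (fun d => decide (total - t ≤ d))) (fun d => d) with
    | some d => total - d
    | none => 0   -- min() of an empty generator raises ValueError: excluded by Pre_

-- ===== PRECONDITION & SPEC =====
-- Pre_ is exactly A's domain of normal return: 0 ≤ k ≤ len(ls) and the sum of the k smallest
-- elements is ≤ t (otherwise no combination qualifies and A's min([]) raises ValueError; B raises too).
def Pre_best_travel (t : Int) (k : Int) (ls : List Int) : Prop :=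
  0 ≤ k ∧ k ≤ ls.length ∧ ((PySem.List.sorted ls (fun x => x) false).take k.toNat).sum ≤ t
instance (t : Int) (k : Int) (ls : List Int) : Decidable (Pre_best_travel t k ls) := by unfold Pre_best_travel; infer_instance

def pvWitness_best_travel : Int × Int × List Int := (10, 2, [3, 7, 2, 9])

def Spec_best_travel (t : Int) (k : Int) (ls : List Int) (out : Int) : Prop := out = best_travel_alt t k ls
instance (t : Int) (k : Int) (ls : List Int) (out : Int) : Decidable (Spec_best_travel t k ls out) := by unfold Spec_best_travel; infer_instance

-- ===== CLAIM (what is proved, stated in full; the proofs are below) =====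
def Claim_equal_best_travel : Prop := ∀ (t : Int) (k : Int) (ls : List Int), Dom_best_travel t k ls → Pre_best_travel t k ls → Spec_best_travel t k ls (best_travel t k ls)

-- ===== LEMMAS AND PROOFS =====

def Ach (ls : List Int) (j : Nat) (s : Int) : Prop :=
  ∃ c : List Int, c.Sublist ls ∧ c.length = j ∧ c.sum = s

lemma sublist_append_singleton_iff {α : Type} (c l : List α) (x : α) :
    c.Sublist (l ++ [x]) ↔ c.Sublist l ∨ ∃ c', c = c' ++ [x] ∧ c'.Sublist l := by
  rw [List.sublist_append_iff]
  constructor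
  · rintro ⟨l1, l2, rfl, h1, h2⟩
    rcases List.sublist_cons_iff.mp h2 with h | ⟨r, rfl, hr⟩
    · simp at h; subst h; left; simpa using h1
    · simp at hr; subst hr; right; exact ⟨l1, rfl, h1⟩
  · rintro (h | ⟨c', rfl, h⟩)
    · exact ⟨c, [], by simp, h, by simp⟩
    · exact ⟨c', [x], rfl, h, List.Sublist.refl _⟩

lemma ach_zero (p : List Int) (s : Int) : Ach p 0 s ↔ s = 0 := by
  constructor
  · rintro ⟨c, -, hl, rfl⟩
    rw [List.length_eq_zero_iff] at hl; subst hl; rfl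
  · rintro rfl; exact ⟨[], List.nil_sublist _, rfl, rfl⟩

lemma ach_append (p : List Int) (x : Int) (j : Nat) (s : Int) :
    Ach (p ++ [x]) (j + 1) s ↔ Ach p (j + 1) s ∨ ∃ s', Ach p j s' ∧ s' + x = s := by
  constructor
  · rintro ⟨c, hc, hl, rfl⟩
    rcases (sublist_append_singleton_iff c p x).mp hc with h | ⟨c', rfl, h⟩
    · exact Or.inl ⟨c, h, hl, rfl⟩
    · right
      refine ⟨c'.sum, ⟨c', h, ?_, rfl⟩, by simp⟩
      simpa using hl
  · rintro (⟨c, hc, hl, rfl⟩ | ⟨s', ⟨c, hc, hl, rfl⟩, rfl⟩)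
    · exact ⟨c, (sublist_append_singleton_iff c p x).mpr (Or.inl hc), hl, rfl⟩
    · exact ⟨c ++ [x], (sublist_append_singleton_iff _ p x).mpr (Or.inr ⟨c, rfl, hc⟩),
        by simp [hl], by simp⟩

lemma bt_step_length (x : Int) (dp : List (PySem.Set Int)) (h : dp ≠ []) :
    (bt_step x dp).length = dp.length := by
  have : dp.length ≠ 0 := by simpa using List.length_pos_of_ne_nil h |>.ne'
  simp only [bt_step, List.length_append, List.length_take, List.length_map, List.length_zip,
    List.length_drop]
  omega

lemma bt_step_getD_zero (x : Int) (dp : List (PySem.Set Int)) (h : dp ≠ []) :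
    (bt_step x dp).getD 0 PySem.Set.empty = dp.getD 0 PySem.Set.empty := by
  cases dp with
  | nil => simp at h
  | cons a l => simp [bt_step]

lemma bt_step_getD_succ (x : Int) (dp : List (PySem.Set Int)) (j : Nat) (hj : j + 1 < dp.length) :
    (bt_step x dp).getD (j + 1) PySem.Set.empty =
      PySem.Set.union (dp.getD (j + 1) PySem.Set.empty)
        (PySem.Set.ofList ((dp.getD j PySem.Set.empty).map (· + x))) := by
  have hlen : (((dp.drop 1).zip dp).map
      (fun cp => PySem.Set.union cp.1 (PySem.Set.ofList (cp.2.map (· + x))))).length = dp.length - 1 := by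
    simp only [List.length_map, List.length_zip, List.length_drop]; omega
  have h1 : (dp.take 1).length = 1 := by simp; omega
  have hjlt : j < dp.length - 1 := by omega
  have hz : j < ((dp.drop 1).zip dp).length := by simp only [List.length_zip, List.length_drop]; omega
  rw [List.getD_eq_getElem?_getD]
  unfold bt_step
  rw [List.getElem?_append_right (by rw [h1]; omega), h1, Nat.add_sub_cancel,
    List.getElem?_map, List.getElem?_eq_getElem hz, List.getElem_zip]
  have hd : (dp.drop 1)[j]'(by simp only [List.length_drop]; omega) = dp[j+1]'hj := by
    simp
  rw [hd]
  simp [List.getD_eq_getElem?_getD, hj,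
    List.getElem?_eq_getElem (show j < dp.length by omega)]

def BTInv (kn : Nat) (p : List Int) (dp : List (PySem.Set Int)) : Prop :=
  dp.length = kn + 1 ∧ ∀ j, j ≤ kn → ∀ s : Int, s ∈ dp.getD j PySem.Set.empty ↔ Ach p j s

lemma inv_step (kn : Nat) (p : List Int) (dp : List (PySem.Set Int)) (x : Int)
    (h : BTInv kn p dp) : BTInv kn (p ++ [x]) (bt_step x dp) := by
  obtain ⟨hlen, hmem⟩ := h
  have hne : dp ≠ [] := by intro h; simp [h] at hlen
  refine ⟨by rw [bt_step_length x dp hne, hlen], ?_⟩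
  intro j hj s
  cases j with
  | zero =>
    rw [bt_step_getD_zero x dp hne, hmem 0 (Nat.zero_le _), ach_zero, ach_zero]
  | succ i =>
    rw [bt_step_getD_succ x dp i (by omega), PySem.Set.mem_union, PySem.Set.mem_ofList,
      ach_append]
    rw [hmem (i+1) hj]
    constructor
    · rintro (h | h)
      · exact Or.inl h
      · obtain ⟨s', hs', rfl⟩ := List.mem_map.mp h
        exact Or.inr ⟨s', (hmem i (by omega) s').mp hs', rfl⟩
    · rintro (h | ⟨s', hs', rfl⟩)
      · exact Or.inl h
      · exact Or.inr (List.mem_map.mpr ⟨s', (hmem i (by omega) s').mpr hs', rfl⟩)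

lemma inv_init (kn : Nat) :
    BTInv kn [] ((List.replicate (kn + 1) (PySem.Set.empty)).modify 0 (fun s => PySem.Set.add s 0)) := by
  constructor
  · simp
  · intro j hj s
    cases j with
    | zero =>
      cases kn <;>
        simp [List.replicate_succ, PySem.Set.add, PySem.Set.empty, PySem.Set.contains, ach_zero]
    | succ i =>
      have h1 : (List.replicate (kn + 1) (PySem.Set.empty : PySem.Set Int)).modify 0
          (fun s => PySem.Set.add s 0) = (PySem.Set.add PySem.Set.empty 0) :: List.replicate kn PySem.Set.empty := by
        simp [List.replicate_succ]
      rw [h1]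
      have h2 : ((PySem.Set.add PySem.Set.empty 0) :: List.replicate kn (PySem.Set.empty : PySem.Set Int)).getD (i+1) PySem.Set.empty = PySem.Set.empty := by
        simp [List.getD_eq_getElem?_getD, List.getElem?_replicate]
        split <;> simp
      rw [h2]
      simp only [PySem.Set.empty]
      constructor
      · intro hmem; simp at hmem
      · rintro ⟨c, hc, hlen, rfl⟩
        exact absurd (List.sublist_nil.mp hc) (by intro h; subst h; simp at hlen)

lemma inv_foldl (kn : Nat) (ls : List Int) (dp : List (PySem.Set Int)) (h : BTInv kn [] dp) :
    BTInv kn ls (ls.foldl (fun dp x => bt_step x dp) dp) := by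
  induction ls using List.reverseRecOn with
  | nil => exact h
  | append_singleton p x ih =>
    rw [List.foldl_append]
    exact inv_step kn p _ x ih

lemma pre_exists (t : Int) (k : Int) (ls : List Int)
    (hk0 : 0 ≤ k) (hklen : k ≤ ls.length)
    (hts : ((PySem.List.sorted ls (fun x => x) false).take k.toNat).sum ≤ t) :
    ∃ m : Int, Ach ls k.toNat m ∧ m ≤ t := by
  set w := (PySem.List.sorted ls (fun x => x) false).take k.toNat with hw
  have hperm : (PySem.List.sorted ls (fun x => x) false).Perm ls := PySem.List.sorted_perm ls _ false
  have hsubp : List.Subperm w ls :=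
    ((List.take_sublist _ _).subperm).trans hperm.subperm
  obtain ⟨c, hcw, hcls⟩ := hsubp
  have hlw : w.length = k.toNat := by
    rw [hw, List.length_take, hperm.length_eq]
    omega
  refine ⟨c.sum, ⟨c, hcls, by rw [hcw.length_eq, hlw], rfl⟩, ?_⟩
  rw [hcw.sum_eq]; exact hts

-- the complement of a combination is a combination
lemma sublist_compl (c ls : List Int) (h : c.Sublist ls) :
    ∃ d : List Int, d.Sublist ls ∧ d.length + c.length = ls.length ∧ c.sum + d.sum = ls.sum := by
  induction h with
  | slnil => exact ⟨[], by simp⟩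
  | cons x h ih =>
    obtain ⟨d, hd, hl, hs⟩ := ih
    exact ⟨x :: d, hd.cons₂ x, by simp [← hl]; omega, by simp [← hs]; ring⟩
  | cons₂ x h ih =>
    obtain ⟨d, hd, hl, hs⟩ := ih
    exact ⟨d, hd.cons x, by simp [← hl]; omega, by simp [← hs]; ring⟩

-- max of the qualifying sums is unique
lemma max_unique (Q : Int → Prop) (r1 r2 : Int)
    (h1 : Q r1 ∧ ∀ y, Q y → y ≤ r1) (h2 : Q r2 ∧ ∀ y, Q y → y ≤ r2) : r1 = r2 :=
  le_antisymm (h2.2 r1 h1.1) (h1.2 r2 h2.1)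

lemma best_travel_eq_alt (t : Int) (k : Int) (ls : List Int)
    (hpre : Pre_best_travel t k ls) : best_travel t k ls = best_travel_alt t k ls := by
  obtain ⟨hk0, hklen, hts⟩ := hpre
  set kn := k.toNat with hkn
  obtain ⟨m0, hm0a, hm0t⟩ := pre_exists t k ls hk0 hklen hts
  set Q : Int → Prop := fun y => Ach ls kn y ∧ y ≤ t with hQ
  -- ===== A side =====
  set L : List (List Int) := PySem.Set.ofList (PySem.List.combinations ls kn) with hL
  have hmemL : ∀ c, c ∈ L ↔ (c.Sublist ls ∧ c.length = kn) := by
    intro c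
    rw [hL, PySem.Set.mem_ofList, PySem.List.mem_combinations_iff]
  set F : List (List Int) := L.filter (fun c => decide (c.sum ≤ t)) with hF
  have hmemF : ∀ c, c ∈ F ↔ ((c.Sublist ls ∧ c.length = kn) ∧ c.sum ≤ t) := by
    intro c; rw [hF, List.mem_filter, hmemL]; simp
  have hfold : L.foldl (fun (p : List Int × List Int) c =>
      if c.sum ≤ t then (p.1 ++ [c.sum], p.2 ++ [t - c.sum]) else p) (([] : List Int), ([] : List Int))
      = (F.map (fun c => c.sum), F.map (fun c => t - c.sum)) := by
    have he : (fun (p : List Int × List Int) c =>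
        if c.sum ≤ t then (p.1 ++ [c.sum], p.2 ++ [t - c.sum]) else p)
        = fun (s : List Int × List Int) e =>
          ((fun a (c : List Int) => if c.sum ≤ t then a ++ [c.sum] else a) s.1 e,
           (fun a (c : List Int) => if c.sum ≤ t then a ++ [t - c.sum] else a) s.2 e) := by
      funext p c; by_cases h : c.sum ≤ t <;> simp [h]
    rw [he, PySem.List.foldl_prod_mk (f := fun a (c : List Int) => if c.sum ≤ t then a ++ [c.sum] else a)
      (g := fun a (c : List Int) => if c.sum ≤ t then a ++ [t - c.sum] else a)]
    rw [PySem.List.foldl_append_ite (p := fun c : List Int => c.sum ≤ t) (f := fun c : List Int => c.sum),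
        PySem.List.foldl_append_ite (p := fun c : List Int => c.sum ≤ t) (f := fun c : List Int => t - c.sum)]
    simp [hF]
  have hwitF : m0 ∈ F.map (fun c => c.sum) := by
    obtain ⟨c, hc, hlc, rfl⟩ := hm0a
    exact List.mem_map.mpr ⟨c, (hmemF c).mpr ⟨⟨hc, hlc⟩, hm0t⟩, rfl⟩
  have hFne : F.map (fun c => t - c.sum) ≠ [] := by
    intro h
    rcases List.mem_map.mp hwitF with ⟨c, hcF, -⟩
    have : c ∈ F := hcF
    simp [List.map_eq_nil_iff] at h
    simp [h] at this
  have hA : Q (best_travel t k ls) ∧ ∀ y, Q y → y ≤ best_travel t k ls := by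
    unfold best_travel
    simp only [← hkn, ← hL, hfold]
    rcases hmin : PySem.List.min? (F.map (fun c => t - c.sum)) (fun d => d) with _ | closest
    · exact absurd ((PySem.List.min?_eq_none_iff _ _).mp hmin) hFne
    · have hclm : closest ∈ F.map (fun c => t - c.sum) := PySem.List.min?_mem hmin
      have hidx : (PySem.List.index? (F.map (fun c => t - c.sum)) closest).isSome :=
        (PySem.List.index?_isSome_iff _ _).mpr hclm
      rcases hix : PySem.List.index? (F.map (fun c => t - c.sum)) closest with _ | idx
      · rw [hix] at hidx; simp at hidx
      · simp only [hmin, hix]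
        obtain ⟨hk2, hval, -⟩ := PySem.List.getElem_of_index?_eq_some hix
        have hk3 : idx < F.length := by simpa using hk2
        have hget : (PySem.List.pyGet? (F.map (fun c => c.sum)) (idx : Int)).getD 0
            = (F[idx]'hk3).sum := by
          rw [PySem.List.pyGet?_natCast]
          rw [List.getElem?_eq_getElem (by simpa using hk3)]
          simp
        simp only [hget]
        have hvd : t - (F[idx]'hk3).sum = closest := by
          rw [← hval]; simp
        have hmemFi : F[idx]'hk3 ∈ F := List.getElem_mem hk3
        constructor
        · refine ⟨?_, ?_⟩
          · obtain ⟨⟨hs, hl⟩, hsum⟩ := (hmemF _).mp hmemFi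
            exact ⟨_, hs, hl, rfl⟩
          · exact ((hmemF _).mp hmemFi).2
        · intro y hy
          obtain ⟨⟨c, hc, hlc, hsum⟩, hyt⟩ := hy
          subst hsum
          have hcF : c ∈ F := (hmemF c).mpr ⟨⟨hc, hlc⟩, hyt⟩
          have : closest ≤ t - c.sum :=
            PySem.List.min?_isMin hmin _ (List.mem_map.mpr ⟨c, hcF, rfl⟩)
          omega
  -- ===== B side =====
  have hn : kn ≤ ls.length := by omega
  have hB : Q (best_travel_alt t k ls) ∧ ∀ y, Q y → y ≤ best_travel_alt t k ls := by
    unfold best_travel_alt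
    by_cases hsplit : 2 * k ≤ (ls.length : Int)
    · rw [if_pos hsplit]
      have hkk : (k + 1).toNat = kn + 1 := by omega
      unfold bt_achievable
      rw [hkk]
      have hinv := inv_foldl kn ls _ (inv_init kn)
      obtain ⟨hlen, hmem⟩ := hinv
      set dp := ls.foldl (fun dp x => bt_step x dp) ((List.replicate (kn + 1) PySem.Set.empty).modify 0 (fun s => PySem.Set.add s 0)) with hdp
      set cand := (dp.getD kn PySem.Set.empty).filter (fun s => decide (s ≤ t)) with hcand
      show Q (match PySem.List.max? cand (fun s => s) with | some m => m | none => 0) ∧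
        ∀ y, Q y → y ≤ (match PySem.List.max? cand (fun s => s) with | some m => m | none => 0)
      have hmemc : ∀ y, y ∈ cand ↔ Q y := by
        intro y
        rw [hcand, List.mem_filter]
        constructor
        · rintro ⟨h1, h2⟩
          exact ⟨(hmem kn le_rfl y).mp h1, by simpa using h2⟩
        · rintro ⟨h1, h2⟩
          exact ⟨(hmem kn le_rfl y).mpr h1, by simpa using h2⟩
      rcases hmax : PySem.List.max? cand (fun s => s) with _ | m
      · have h0 : cand = [] := (PySem.List.max?_eq_none_iff _ _).mp hmax
        have h1 : m0 ∈ cand := (hmemc m0).mpr ⟨hm0a, hm0t⟩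
        rw [h0] at h1; simp at h1
      · constructor
        · exact (hmemc m).mp (PySem.List.max?_mem hmax)
        · intro y hy
          exact PySem.List.max?_isMax hmax y ((hmemc y).mpr hy)
    · rw [if_neg hsplit]
      set r : Int := (ls.length : Int) - k with hr
      set rn := r.toNat with hrn
      have hr0 : 0 ≤ r := by omega
      have hrk : rn = ls.length - kn := by omega
      have hkk : (r + 1).toNat = rn + 1 := by omega
      unfold bt_achievable
      simp only [hkk, ← hrn]
      have hinv := inv_foldl rn ls _ (inv_init rn)
      obtain ⟨hlen, hmem⟩ := hinv
      set dp := ls.foldl (fun dp x => bt_step x dp) ((List.replicate (rn + 1) PySem.Set.empty).modify 0 (fun s => PySem.Set.add s 0)) with hdp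
      set cand := (dp.getD rn PySem.Set.empty).filter (fun d => decide (ls.sum - t ≤ d)) with hcand
      show Q (match PySem.List.min? cand (fun d => d) with | some d => ls.sum - d | none => 0) ∧
        ∀ y, Q y → y ≤ (match PySem.List.min? cand (fun d => d) with | some d => ls.sum - d | none => 0)
      have hmemc : ∀ d, d ∈ cand ↔ (Ach ls rn d ∧ ls.sum - t ≤ d) := by
        intro d
        rw [hcand, List.mem_filter]
        constructor
        · rintro ⟨h1, h2⟩
          exact ⟨(hmem rn le_rfl d).mp h1, by simpa using h2⟩
        · rintro ⟨h1, h2⟩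
          exact ⟨(hmem rn le_rfl d).mpr h1, by simpa using h2⟩
      -- Q y ↔ ls.sum - y ∈ cand
      have hQc : ∀ y, Q y → (ls.sum - y) ∈ cand := by
        rintro y ⟨⟨c, hc, hlc, hsc⟩, hyt⟩
        obtain ⟨d, hd, hld, hsd⟩ := sublist_compl c ls hc
        have hdr : d.length = rn := by omega
        refine (hmemc _).mpr ⟨⟨d, hd, hdr, by omega⟩, by omega⟩
      have hcQ : ∀ d, d ∈ cand → Q (ls.sum - d) := by
        intro d hdc
        obtain ⟨⟨e, he, hle, hse⟩, hdt⟩ := (hmemc d).mp hdc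
        obtain ⟨c, hc, hlc, hsc⟩ := sublist_compl e ls he
        have hck : c.length = kn := by omega
        exact ⟨⟨c, hc, hck, by omega⟩, by omega⟩
      rcases hmin2 : PySem.List.min? cand (fun d => d) with _ | dmin
      · have h0 : cand = [] := (PySem.List.min?_eq_none_iff _ _).mp hmin2
        have h1 : (ls.sum - m0) ∈ cand := hQc m0 ⟨hm0a, hm0t⟩
        rw [h0] at h1; simp at h1
      · constructor
        · exact hcQ dmin (PySem.List.min?_mem hmin2)
        · intro y hy
          have : dmin ≤ ls.sum - y := PySem.List.min?_isMin hmin2 _ (hQc y hy)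
          show y ≤ ls.sum - dmin
          omega
  exact max_unique Q _ _ hA hB

-- ===== VERDICT (by name: the statement is the Claim_ definition above) =====
theorem best_travel_spec : Claim_equal_best_travel := by
  intro t k ls _ hpre
  unfold Spec_best_travel
  exact best_travel_eq_alt t k ls hpre
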